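-- pv_equiv track=rewrite | github.com/DPNT-Sourcecode/CHK-irjr01 | lib/solutions/CHK/checkout_solution.py | checkout_one
-- ===== SOURCE A (Python) =====
-- from collections import defaultdict
--
-- def checkout_one(skus):
--     cart = defaultdict(int)
--     specials = {
--         # key -> (count, special price)
--         "A": (3, 130),
--         "B": (2, 45),
--     }
--
--     prices = {
--         "A": 50,
--         "B": 30,
--         "C": 20,
--         "D": 15,
--     }
--     for sku in skus:
--         if sku not in prices:
--             return -1
--         cart[sku] += 1
--
--     result = 0
--     for sku, count in cart.items():
--         if sku in specials:
--             (special_count, special_price) = specials[sku]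
--
--             times = count // special_count
--             special_rate = times * special_price
--
--             remaining = count % special_count
--             remaining_rate = remaining * prices[sku]
--
--             result += special_rate + remaining_rate
--
--         else:
--             result += count * prices[sku]
--     return result
-- ===== SOURCE B (Python) =====
-- from collections import defaultdict
--
-- def checkout_one(skus):
--     prices = {
--         "A": 50,
--         "B": 30,
--         "C": 20,
--         "D": 15,
--     }
--     specials = {
--         # key -> (count, special price)
--         "A": (3, 130),
--         "B": (2, 45),
--     }
--     counts = defaultdict(int)
--     result = 0
--     for sku in skus:
--         if sku not in prices:
--             return -1
--         counts[sku] += 1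
--         result += prices[sku]
--         if sku in specials:
--             special_count, special_price = specials[sku]
--             if counts[sku] % special_count == 0:
--                 # the last special_count items were charged at unit price;
--                 # adjust to the offer price instead
--                 result += special_price - special_count * prices[sku]
--     return result
-- ===== Notes on version B (the rewrite author's own statement) =====
-- stated objective: alternative
-- what changed: B computes the total online in a single pass (running result adjusted whenever a multi-buy threshold is hit), instead of A's two-pass count-then-divide structure with // and % over the final cart.
import Mathlib
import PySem

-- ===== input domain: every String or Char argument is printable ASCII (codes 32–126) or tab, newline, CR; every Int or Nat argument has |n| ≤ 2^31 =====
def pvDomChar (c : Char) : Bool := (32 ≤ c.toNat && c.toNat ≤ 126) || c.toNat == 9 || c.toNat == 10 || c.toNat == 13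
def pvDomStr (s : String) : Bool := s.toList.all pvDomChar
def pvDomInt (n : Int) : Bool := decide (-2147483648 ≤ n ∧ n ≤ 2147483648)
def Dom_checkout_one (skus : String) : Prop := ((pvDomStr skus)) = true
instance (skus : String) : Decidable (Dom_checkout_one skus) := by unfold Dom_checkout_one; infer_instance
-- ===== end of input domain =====

-- B computes the checkout total online in a single pass (running result adjusted at each
-- multi-buy threshold) instead of A's two-pass count-then-divide structure; same cost.


-- ===== PORT A =====
def pvPricesA : PySem.Dict Char Int :=
  PySem.Dict.ofList [('A', 50), ('B', 30), ('C', 20), ('D', 15)]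

def pvSpecialsA : PySem.Dict Char (Int × Int) :=
  PySem.Dict.ofList [('A', (3, 130)), ('B', (2, 45))]

-- first loop of A: fill the cart, early return (none) on an unknown sku
def pvFillCart : List Char → PySem.Dict Char Int → Option (PySem.Dict Char Int)
  | [], cart => some cart
  | s :: rest, cart =>
    if pvPricesA.contains s then pvFillCart rest (cart.modify s 0 (· + 1)) else none

-- body of A's second loop (over cart.items)
def pvItemStep (result : Int) (p : Char × Int) : Int :=
  match pvSpecialsA.get? p.1 with
  | some sc_sp =>
      result + (PySem.Int.floordiv p.2 sc_sp.1 * sc_sp.2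
                + PySem.Int.mod p.2 sc_sp.1 * pvPricesA.getD p.1 0)
  | none => result + p.2 * pvPricesA.getD p.1 0

def checkout_one (skus : String) : Int :=
  match pvFillCart skus.toList PySem.Dict.empty with
  | none => -1
  | some cart => cart.items.foldl pvItemStep 0

-- ===== PORT B =====
def pvPricesB : PySem.Dict Char Int :=
  PySem.Dict.ofList [('A', 50), ('B', 30), ('C', 20), ('D', 15)]

def pvSpecialsB : PySem.Dict Char (Int × Int) :=
  PySem.Dict.ofList [('A', (3, 130)), ('B', (2, 45))]

-- B's single pass: running counts and running result
def pvGoB : List Char → PySem.Dict Char Int → Int → Int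
  | [], _, result => result
  | s :: rest, counts, result =>
    match pvPricesB.get? s with
    | none => -1
    | some price =>
      let counts' := counts.modify s 0 (· + 1)
      let bonus :=
        match pvSpecialsB.get? s with
        | some sc_sp =>
            if PySem.Int.mod (counts'.getD s 0) sc_sp.1 == 0 then sc_sp.2 - sc_sp.1 * price
            else 0
        | none => 0
      pvGoB rest counts' (result + price + bonus)

def checkout_one_alt (skus : String) : Int := pvGoB skus.toList PySem.Dict.empty 0

-- ===== PRECONDITION & SPEC =====
def Spec_checkout_one (skus : String) (out : Int) : Prop := out = checkout_one_alt skus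
instance (skus : String) (out : Int) : Decidable (Spec_checkout_one skus out) := by unfold Spec_checkout_one; infer_instance

-- ===== CLAIM (what is proved, stated in full; the proofs are below) =====
def Claim_equal_checkout_one : Prop := ∀ (skus : String), Dom_checkout_one skus → Spec_checkout_one skus (checkout_one skus)

-- ===== LEMMAS AND PROOFS =====

-- literal-dict views of the four dictionaries
lemma pvPricesA_mk : pvPricesA = PySem.Dict.mk [('A', 50), ('B', 30), ('C', 20), ('D', 15)] := rfl
lemma pvSpecialsA_mk : pvSpecialsA = PySem.Dict.mk [('A', (3, 130)), ('B', (2, 45))] := rfl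
lemma pvPricesB_mk : pvPricesB = PySem.Dict.mk [('A', 50), ('B', 30), ('C', 20), ('D', 15)] := rfl
lemma pvSpecialsB_mk : pvSpecialsB = PySem.Dict.mk [('A', (3, 130)), ('B', (2, 45))] := rfl

-- offer price for n items of 'A' resp. 'B'; pvS = the total for a multiset of valid skus
def pvOA (n : Nat) : Int := ((n / 3 : Nat) : Int) * 130 + ((n % 3 : Nat) : Int) * 50
def pvOB (n : Nat) : Int := ((n / 2 : Nat) : Int) * 45 + ((n % 2 : Nat) : Int) * 30
def pvS (p : List Char) : Int :=
  pvOA (p.count 'A') + pvOB (p.count 'B')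
    + (p.count 'C' : Int) * 20 + (p.count 'D' : Int) * 15

lemma pv_valid_cases (k : Char) (h : pvPricesA.contains k = true) :
    k = 'A' ∨ k = 'B' ∨ k = 'C' ∨ k = 'D' := by
  rw [pvPricesA_mk] at h
  simp [PySem.Dict.contains_mk] at h
  rcases h with h | h | h | h <;> simp [h.symm]

lemma pvItemStep_A (acc : Int) (n : Nat) : pvItemStep acc ('A', (n : Int)) = acc + pvOA n := by
  simp [pvItemStep, pvSpecialsA_mk, pvPricesA_mk, PySem.Dict.get?_mk_cons,
        PySem.Dict.getD_eq_get?_getD, pvOA]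

lemma pvItemStep_B (acc : Int) (n : Nat) : pvItemStep acc ('B', (n : Int)) = acc + pvOB n := by
  simp [pvItemStep, pvSpecialsA_mk, pvPricesA_mk, PySem.Dict.get?_mk_cons,
        PySem.Dict.getD_eq_get?_getD, pvOB]

lemma pvItemStep_C (acc : Int) (n : Nat) : pvItemStep acc ('C', (n : Int)) = acc + (n : Int) * 20 := by
  simp [pvItemStep, pvSpecialsA_mk, pvPricesA_mk,
        PySem.Dict.getD_eq_get?_getD, PySem.Dict.get?]

lemma pvItemStep_D (acc : Int) (n : Nat) : pvItemStep acc ('D', (n : Int)) = acc + (n : Int) * 15 := by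
  simp [pvItemStep, pvSpecialsA_mk, pvPricesA_mk,
        PySem.Dict.getD_eq_get?_getD, PySem.Dict.get?]

lemma pvFillCart_spec (l : List Char) (cart : PySem.Dict Char Int) :
    pvFillCart l cart =
      if l.all (fun c => pvPricesA.contains c) then
        some (l.foldl (fun d x => d.modify x 0 (· + 1)) cart)
      else none := by
  induction l generalizing cart with
  | nil => simp [pvFillCart]
  | cons s rest ih =>
    by_cases hs : pvPricesA.contains s = true
    · simp [pvFillCart, hs, ih]
    · simp [pvFillCart, hs]

lemma pvItems_sum (ks : List Char) (cnt : Char → Nat) (acc : Int)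
    (hnd : ks.Nodup) (hsub : ∀ k ∈ ks, pvPricesA.contains k = true) :
    (ks.map (fun k => (k, (cnt k : Int)))).foldl pvItemStep acc =
      acc + (if 'A' ∈ ks then pvOA (cnt 'A') else 0)
          + (if 'B' ∈ ks then pvOB (cnt 'B') else 0)
          + (if 'C' ∈ ks then (cnt 'C' : Int) * 20 else 0)
          + (if 'D' ∈ ks then (cnt 'D' : Int) * 15 else 0) := by
  induction ks generalizing acc with
  | nil => simp
  | cons k rest ih =>
    rcases List.nodup_cons.mp hnd with ⟨hk, hrest⟩
    have hstep := hsub k (List.mem_cons_self)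
    have ih' := ih (acc := pvItemStep acc (k, (cnt k : Int))) hrest
      (fun x hx => hsub x (List.mem_cons_of_mem _ hx))
    rw [List.map_cons, List.foldl_cons, ih']
    rcases pv_valid_cases k hstep with h | h | h | h <;> subst h <;>
      simp only [pvItemStep_A, pvItemStep_B, pvItemStep_C, pvItemStep_D, List.mem_cons] <;>
      simp [hk] <;> ring

lemma pvOA_succ (c : Nat) :
    pvOA (c + 1) = pvOA c + 50 + (if (c + 1) % 3 = 0 then -20 else 0) := by
  unfold pvOA; split_ifs with h <;> omega

lemma pvOB_succ (c : Nat) :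
    pvOB (c + 1) = pvOB c + 30 + (if (c + 1) % 2 = 0 then -15 else 0) := by
  unfold pvOB; split_ifs with h <;> omega

lemma pvdvd3 (c : Nat) : (3 ∣ (c : Int) + 1) ↔ ((c + 1) % 3 = 0) := by omega

lemma pvdvd2 (c : Nat) : (2 ∣ (c : Int) + 1) ↔ ((c + 1) % 2 = 0) := by omega

lemma pvS_append_A (p : List Char) :
    pvS (p ++ ['A']) = pvS p + 50 + (if (p.count 'A' + 1) % 3 = 0 then -20 else 0) := by
  unfold pvS
  rw [List.count_append, List.count_append, List.count_append, List.count_append,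
      show List.count 'A' (['A'] : List Char) = 1 from by decide,
      show List.count 'B' (['A'] : List Char) = 0 from by decide,
      show List.count 'C' (['A'] : List Char) = 0 from by decide,
      show List.count 'D' (['A'] : List Char) = 0 from by decide,
      pvOA_succ]
  push_cast
  split_ifs <;> ring

lemma pvS_append_B (p : List Char) :
    pvS (p ++ ['B']) = pvS p + 30 + (if (p.count 'B' + 1) % 2 = 0 then -15 else 0) := by
  unfold pvS
  rw [List.count_append, List.count_append, List.count_append, List.count_append,
      show List.count 'A' (['B'] : List Char) = 0 from by decide,
      show List.count 'B' (['B'] : List Char) = 1 from by decide,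
      show List.count 'C' (['B'] : List Char) = 0 from by decide,
      show List.count 'D' (['B'] : List Char) = 0 from by decide,
      pvOB_succ]
  push_cast
  split_ifs <;> ring

lemma pvS_append_C (p : List Char) : pvS (p ++ ['C']) = pvS p + 20 := by
  unfold pvS
  rw [List.count_append, List.count_append, List.count_append, List.count_append,
      show List.count 'A' (['C'] : List Char) = 0 from by decide,
      show List.count 'B' (['C'] : List Char) = 0 from by decide,
      show List.count 'C' (['C'] : List Char) = 1 from by decide,
      show List.count 'D' (['C'] : List Char) = 0 from by decide]
  push_cast
  ring

lemma pvS_append_D (p : List Char) : pvS (p ++ ['D']) = pvS p + 15 := by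
  unfold pvS
  rw [List.count_append, List.count_append, List.count_append, List.count_append,
      show List.count 'A' (['D'] : List Char) = 0 from by decide,
      show List.count 'B' (['D'] : List Char) = 0 from by decide,
      show List.count 'C' (['D'] : List Char) = 0 from by decide,
      show List.count 'D' (['D'] : List Char) = 1 from by decide]
  push_cast
  ring

lemma pvGoB_spec (l : List Char) (p : List Char) (res : Int) :
    pvGoB l (PySem.Dict.counter p) res =
      if l.all (fun c => pvPricesA.contains c) then res + (pvS (p ++ l) - pvS p)
      else -1 := by
  induction l generalizing p res with
  | nil => simp [pvGoB]
  | cons s rest ih =>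
    by_cases hs : pvPricesA.contains s = true
    · have hall : ((s :: rest).all (fun c => pvPricesA.contains c))
          = rest.all (fun c => pvPricesA.contains c) := by simp [hs]
      rw [hall]
      have hcounts : (PySem.Dict.counter p).modify s 0 (· + 1)
          = PySem.Dict.counter (p ++ [s]) := (PySem.Dict.counter_append_singleton p s).symm
      rcases pv_valid_cases s hs with h | h | h | h
      · subst h
        have hstep : pvGoB ('A' :: rest) (PySem.Dict.counter p) res
            = pvGoB rest (PySem.Dict.counter (p ++ ['A']))
                (res + 50 + (if (p.count 'A' + 1) % 3 = 0 then (-20 : Int) else 0)) := by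
          simp [pvGoB, pvPricesB_mk, pvSpecialsB_mk, PySem.Dict.get?, hcounts,
                PySem.Dict.getD_counter, List.count_append, pvdvd3]
        rw [hstep, ih, show p ++ 'A' :: rest = (p ++ ['A']) ++ rest by simp]
        by_cases hr : rest.all (fun c => pvPricesA.contains c) <;>
          simp only [hr, if_true] <;>
          [skip; rfl]
        rw [pvS_append_A]; split_ifs <;> ring
      · subst h
        have hstep : pvGoB ('B' :: rest) (PySem.Dict.counter p) res
            = pvGoB rest (PySem.Dict.counter (p ++ ['B']))
                (res + 30 + (if (p.count 'B' + 1) % 2 = 0 then (-15 : Int) else 0)) := by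
          simp [pvGoB, pvPricesB_mk, pvSpecialsB_mk, PySem.Dict.get?, List.find?, hcounts,
                PySem.Dict.getD_counter, List.count_append, pvdvd2]
        rw [hstep, ih, show p ++ 'B' :: rest = (p ++ ['B']) ++ rest by simp]
        by_cases hr : rest.all (fun c => pvPricesA.contains c) <;>
          simp only [hr, if_true] <;>
          [skip; rfl]
        rw [pvS_append_B]; split_ifs <;> ring
      · subst h
        have hstep : pvGoB ('C' :: rest) (PySem.Dict.counter p) res
            = pvGoB rest (PySem.Dict.counter (p ++ ['C'])) (res + 20) := by
          simp [pvGoB, pvPricesB_mk, pvSpecialsB_mk, PySem.Dict.get?, List.find?, hcounts]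
        rw [hstep, ih, show p ++ 'C' :: rest = (p ++ ['C']) ++ rest by simp]
        by_cases hr : rest.all (fun c => pvPricesA.contains c) <;>
          simp only [hr, if_true] <;>
          [skip; rfl]
        rw [pvS_append_C]; ring
      · subst h
        have hstep : pvGoB ('D' :: rest) (PySem.Dict.counter p) res
            = pvGoB rest (PySem.Dict.counter (p ++ ['D'])) (res + 15) := by
          simp [pvGoB, pvPricesB_mk, pvSpecialsB_mk, PySem.Dict.get?, List.find?, hcounts]
        rw [hstep, ih, show p ++ 'D' :: rest = (p ++ ['D']) ++ rest by simp]
        by_cases hr : rest.all (fun c => pvPricesA.contains c) <;>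
          simp only [hr, if_true] <;>
          [skip; rfl]
        rw [pvS_append_D]; ring
    · have hnone : pvPricesB.get? s = none := by
        rw [pvPricesB_mk]; rw [pvPricesA_mk] at hs
        exact (PySem.Dict.get?_eq_none_iff_contains _ _).mpr (by simpa using hs)
      simp [pvGoB, hnone, hs]

lemma pvS_nil : pvS [] = 0 := by simp [pvS, pvOA, pvOB]

theorem pv_main (skus : String) : checkout_one skus = checkout_one_alt skus := by
  unfold checkout_one checkout_one_alt
  rw [pvFillCart_spec,
      show (PySem.Dict.empty : PySem.Dict Char Int) = PySem.Dict.counter ([] : List Char) from rfl,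
      pvGoB_spec]
  by_cases hall : skus.toList.all (fun c => pvPricesA.contains c) = true
  · rw [if_pos hall, if_pos hall,
        show skus.toList.foldl (fun d x => d.modify x 0 (· + 1)) (PySem.Dict.counter ([] : List Char))
          = PySem.Dict.counter skus.toList from (PySem.Dict.counter_eq_foldl _).symm]
    show (PySem.Dict.counter skus.toList).items.foldl pvItemStep 0
        = 0 + (pvS ([] ++ skus.toList) - pvS [])
    rw [PySem.Dict.items_counter,
        pvItems_sum (PySem.Set.ofList skus.toList) (fun k => skus.toList.count k) 0
          (PySem.Set.nodup_ofList _)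
          (fun k hk => by
            have hm : k ∈ skus.toList := (PySem.Set.mem_ofList _ _).mp hk
            exact (List.all_eq_true.mp hall) k hm)]
    have hA : (if 'A' ∈ PySem.Set.ofList skus.toList then pvOA (skus.toList.count 'A') else 0)
        = pvOA (skus.toList.count 'A') := by
      by_cases h : 'A' ∈ skus.toList
      · simp [PySem.Set.mem_ofList, h]
      · simp [PySem.Set.mem_ofList, h, List.count_eq_zero.mpr h,
              show pvOA 0 = 0 from by decide]
    have hB : (if 'B' ∈ PySem.Set.ofList skus.toList then pvOB (skus.toList.count 'B') else 0)
        = pvOB (skus.toList.count 'B') := by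
      by_cases h : 'B' ∈ skus.toList
      · simp [PySem.Set.mem_ofList, h]
      · simp [PySem.Set.mem_ofList, h, List.count_eq_zero.mpr h,
              show pvOB 0 = 0 from by decide]
    have hC : (if 'C' ∈ PySem.Set.ofList skus.toList then ((skus.toList.count 'C' : Int)) * 20 else 0)
        = (skus.toList.count 'C' : Int) * 20 := by
      by_cases h : 'C' ∈ skus.toList
      · simp [PySem.Set.mem_ofList, h]
      · simp [PySem.Set.mem_ofList, h, List.count_eq_zero.mpr h]
    have hD : (if 'D' ∈ PySem.Set.ofList skus.toList then ((skus.toList.count 'D' : Int)) * 15 else 0)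
        = (skus.toList.count 'D' : Int) * 15 := by
      by_cases h : 'D' ∈ skus.toList
      · simp [PySem.Set.mem_ofList, h]
      · simp [PySem.Set.mem_ofList, h, List.count_eq_zero.mpr h]
    rw [hA, hB, hC, hD, pvS_nil, List.nil_append]
    unfold pvS
    ring
  · rw [if_neg hall, if_neg hall]

-- ===== VERDICT (by name: the statement is the Claim_ definition above) =====
theorem checkout_one_spec : Claim_equal_checkout_one := by
  intro skus _
  unfold Spec_checkout_one
  exact pv_main skus
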